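-- pv_equiv track=rewrite | github.com/kenn166/Projets_stats | views.py | _repartition
-- ===== SOURCE A (Python) =====
-- def _repartition(notes):
--     r = {"[0-10[": 0, "[10-12[": 0, "[12-14[": 0, "[14-16[": 0, "[16-20]": 0}
--     for note in notes:
--         if note < 10: r["[0-10["] += 1
--         elif note < 12: r["[10-12["] += 1
--         elif note < 14: r["[12-14["] += 1
--         elif note < 16: r["[14-16["] += 1
--         else: r["[16-20]"] += 1
--     return r
-- ===== SOURCE B (Python) =====
-- def _repartition(notes):
--     bounds = [10, 12, 14, 16]
--     keys = ["[0-10[", "[10-12[", "[12-14[", "[14-16[", "[16-20]"]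
--     counts = [0] * 5
--     for note in notes:
--         counts[sum(b <= note for b in bounds)] += 1
--     return dict(zip(keys, counts))
-- ===== Notes on version B (the rewrite author's own statement) =====
-- stated objective: alternative
-- what changed: Replaced the if/elif cascade over a dict by a boundary table: the bucket index is computed as the count of cut points <= note and used to increment one cell of a 5-element counter list, zipped with the key list at the end.
import Mathlib
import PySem

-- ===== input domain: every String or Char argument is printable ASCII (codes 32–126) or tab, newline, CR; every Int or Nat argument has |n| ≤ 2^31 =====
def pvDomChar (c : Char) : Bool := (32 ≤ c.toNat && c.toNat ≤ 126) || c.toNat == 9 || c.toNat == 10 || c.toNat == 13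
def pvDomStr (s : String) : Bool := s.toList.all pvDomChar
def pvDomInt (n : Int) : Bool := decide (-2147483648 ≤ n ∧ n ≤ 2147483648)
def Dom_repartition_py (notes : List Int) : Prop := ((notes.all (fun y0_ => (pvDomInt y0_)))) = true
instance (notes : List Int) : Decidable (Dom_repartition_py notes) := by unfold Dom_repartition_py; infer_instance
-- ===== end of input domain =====

-- B replaces A's if/elif cascade by a boundary table: the bucket index is the number of
-- cut points ≤ note, used to bump one cell of a 5-counter list (objective: alternative).

-- ===== PORT A =====
def repartition_py (notes : List Int) : List (String × Int) :=
  (notes.foldl (fun r note =>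
      if note < 10 then r.modify "[0-10[" 0 (· + 1)
      else if note < 12 then r.modify "[10-12[" 0 (· + 1)
      else if note < 14 then r.modify "[12-14[" 0 (· + 1)
      else if note < 16 then r.modify "[14-16[" 0 (· + 1)
      else r.modify "[16-20]" 0 (· + 1))
    (PySem.Dict.ofList [("[0-10[", 0), ("[10-12[", 0), ("[12-14[", 0), ("[14-16[", 0), ("[16-20]", 0)])).items

-- ===== PORT B =====
def repartition_py_alt (notes : List Int) : List (String × Int) :=
  let bounds : List Int := [10, 12, 14, 16]
  let keys : List String := ["[0-10[", "[10-12[", "[12-14[", "[14-16[", "[16-20]"]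
  let counts : List Int := notes.foldl (fun cs note =>
      let i := (bounds.map (fun b => if b ≤ note then (1 : Nat) else 0)).sum
      cs.set i (cs.getD i 0 + 1)) [0, 0, 0, 0, 0]
  keys.zip counts

-- ===== PRECONDITION & SPEC =====
def Spec_repartition_py (notes : List Int) (out : List (String × Int)) : Prop := out = repartition_py_alt notes
instance (notes : List Int) (out : List (String × Int)) : Decidable (Spec_repartition_py notes out) := by unfold Spec_repartition_py; infer_instance

-- ===== CLAIM (what is proved, stated in full; the proofs are below) =====
def Claim_equal_repartition_py : Prop := ∀ (notes : List Int), Dom_repartition_py notes → Spec_repartition_py notes (repartition_py notes)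

-- ===== LEMMAS AND PROOFS =====
lemma repartition_inv (notes : List Int) : ∀ (a b c d e : Int),
    (notes.foldl (fun r note =>
        if note < 10 then r.modify "[0-10[" 0 (· + 1)
        else if note < 12 then r.modify "[10-12[" 0 (· + 1)
        else if note < 14 then r.modify "[12-14[" 0 (· + 1)
        else if note < 16 then r.modify "[14-16[" 0 (· + 1)
        else r.modify "[16-20]" 0 (· + 1))
      (PySem.Dict.ofList [("[0-10[", a), ("[10-12[", b), ("[12-14[", c), ("[14-16[", d), ("[16-20]", e)])).items
    = ["[0-10[", "[10-12[", "[12-14[", "[14-16[", "[16-20]"].zip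
        (notes.foldl (fun cs note =>
          let i := (([10, 12, 14, 16] : List Int).map (fun b => if b ≤ note then (1 : Nat) else 0)).sum
          cs.set i (cs.getD i 0 + 1)) [a, b, c, d, e]) := by
  induction notes with
  | nil => intro a b c d e; rfl
  | cons n t ih =>
    intro a b c d e
    simp only [List.foldl_cons]
    rcases lt_or_ge n 10 with h1 | h1
    · rw [show (if n < 10 then (PySem.Dict.ofList [("[0-10[", a), ("[10-12[", b), ("[12-14[", c), ("[14-16[", d), ("[16-20]", e)]).modify "[0-10[" 0 (· + 1) else if n < 12 then (PySem.Dict.ofList [("[0-10[", a), ("[10-12[", b), ("[12-14[", c), ("[14-16[", d), ("[16-20]", e)]).modify "[10-12[" 0 (· + 1) else if n < 14 then (PySem.Dict.ofList [("[0-10[", a), ("[10-12[", b), ("[12-14[", c), ("[14-16[", d), ("[16-20]", e)]).modify "[12-14[" 0 (· + 1) else if n < 16 then (PySem.Dict.ofList [("[0-10[", a), ("[10-12[", b), ("[12-14[", c), ("[14-16[", d), ("[16-20]", e)]).modify "[14-16[" 0 (· + 1) else (PySem.Dict.ofList [("[0-10[", a), ("[10-12[", b), ("[12-14[", c), ("[14-16[",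 d), ("[16-20]", e)]).modify "[16-20]" 0 (· + 1)) = PySem.Dict.ofList [("[0-10[", a + 1), ("[10-12[", b), ("[12-14[", c), ("[14-16[", d), ("[16-20]", e)] from by
        simp only [if_pos (by omega : (n < 10)), ]; simp [PySem.Dict.ofList, PySem.Dict.modify]; rfl]
      rw [ih]
      congr 1
      simp [List.getD, show ¬(((10:Int)) ≤ n) by omega, show ¬(((12:Int)) ≤ n) by omega, show ¬(((14:Int)) ≤ n) by omega, show ¬(((16:Int)) ≤ n) by omega]
    rcases lt_or_ge n 12 with h2 | h2
    · rw [show (if n < 10 then (PySem.Dict.ofList [("[0-10[", a), ("[10-12[", b), ("[12-14[", c), ("[14-16[", d), ("[16-20]", e)]).modify "[0-10[" 0 (· + 1) else if n < 12 then (PySem.Dict.ofList [("[0-10[", a), ("[10-12[", b), ("[12-14[", c), ("[14-16[", d), ("[16-20]", e)]).modify "[10-12[" 0 (· + 1) else if n < 14 then (PySem.Dict.ofList [("[0-10[", a), ("[10-12[", b), ("[12-14[", c), ("[14-16[", d), ("[16-20]", e)]).modify "[12-14[" 0 (· + 1) else if n < 16 then (PySem.Dict.ofList [("[0-10[", a),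 ("[10-12[", b), ("[12-14[", c), ("[14-16[", d), ("[16-20]", e)]).modify "[14-16[" 0 (· + 1) else (PySem.Dict.ofList [("[0-10[", a), ("[10-12[", b), ("[12-14[", c), ("[14-16[", d), ("[16-20]", e)]).modify "[16-20]" 0 (· + 1)) = PySem.Dict.ofList [("[0-10[", a), ("[10-12[", b + 1), ("[12-14[", c), ("[14-16[", d), ("[16-20]", e)] from by
        simp only [if_neg (by omega : ¬ (n < 10)), if_pos (by omega : (n < 12)), ]; simp [PySem.Dict.ofList, PySem.Dict.modify]; rfl]
      rw [ih]
      congr 1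
      simp [List.getD, show (((10:Int)) ≤ n) by omega, show ¬(((12:Int)) ≤ n) by omega, show ¬(((14:Int)) ≤ n) by omega, show ¬(((16:Int)) ≤ n) by omega]
    rcases lt_or_ge n 14 with h3 | h3
    · rw [show (if n < 10 then (PySem.Dict.ofList [("[0-10[", a), ("[10-12[", b), ("[12-14[", c), ("[14-16[", d), ("[16-20]", e)]).modify "[0-10[" 0 (· + 1) else if n < 12 then (PySem.Dict.ofList [("[0-10[", a), ("[10-12[", b), ("[12-14[", c), ("[14-16[", d), ("[16-20]", e)]).modify "[10-12[" 0 (· + 1) else if n < 14 then (PySem.Dict.ofList [("[0-10[", a), ("[10-12[", b), ("[12-14[", c), ("[14-16[", d), ("[16-20]", e)]).modify "[12-14[" 0 (· + 1) else if n < 16 then (PySem.Dict.ofList [("[0-10[", a), ("[10-12[", b), ("[12-14[", c), ("[14-16[", d), ("[16-20]", e)]).modify "[14-16[" 0 (· + 1) else (PySem.Dict.ofList [("[0-10[", a), ("[10-12[", b), ("[12-14[", c), ("[14-16[", d), ("[16-20]", e)]).modify "[16-20]" 0 (· + 1)) = PySem.Dict.ofList [("[0-10[", a), ("[10-12[", b),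 ("[12-14[", c + 1), ("[14-16[", d), ("[16-20]", e)] from by
        simp only [if_neg (by omega : ¬ (n < 10)), if_neg (by omega : ¬ (n < 12)), if_pos (by omega : (n < 14)), ]; simp [PySem.Dict.ofList, PySem.Dict.modify]; rfl]
      rw [ih]
      congr 1
      simp [List.getD, show (((10:Int)) ≤ n) by omega, show (((12:Int)) ≤ n) by omega, show ¬(((14:Int)) ≤ n) by omega, show ¬(((16:Int)) ≤ n) by omega]
    rcases lt_or_ge n 16 with h4 | h4
    · rw [show (if n < 10 then (PySem.Dict.ofList [("[0-10[", a), ("[10-12[", b), ("[12-14[", c), ("[14-16[", d), ("[16-20]", e)]).modify "[0-10[" 0 (· + 1) else if n < 12 then (PySem.Dict.ofList [("[0-10[", a), ("[10-12[", b), ("[12-14[", c), ("[14-16[", d), ("[16-20]", e)]).modify "[10-12[" 0 (· + 1) else if n < 14 then (PySem.Dict.ofList [("[0-10[", a), ("[10-12[", b), ("[12-14[", c), ("[14-16[", d), ("[16-20]", e)]).modify "[12-14[" 0 (· + 1) else if n < 16 then (PySem.Dict.ofList [("[0-10[", a), ("[10-12[", b), ("[12-14[", c), ("[14-16[", d), ("[16-20]",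 e)]).modify "[14-16[" 0 (· + 1) else (PySem.Dict.ofList [("[0-10[", a), ("[10-12[", b), ("[12-14[", c), ("[14-16[", d), ("[16-20]", e)]).modify "[16-20]" 0 (· + 1)) = PySem.Dict.ofList [("[0-10[", a), ("[10-12[", b), ("[12-14[", c), ("[14-16[", d + 1), ("[16-20]", e)] from by
        simp only [if_neg (by omega : ¬ (n < 10)), if_neg (by omega : ¬ (n < 12)), if_neg (by omega : ¬ (n < 14)), if_pos (by omega : (n < 16)), ]; simp [PySem.Dict.ofList, PySem.Dict.modify]; rfl]
      rw [ih]
      congr 1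
      simp [List.getD, show (((10:Int)) ≤ n) by omega, show (((12:Int)) ≤ n) by omega, show (((14:Int)) ≤ n) by omega, show ¬(((16:Int)) ≤ n) by omega]
    · rw [show (if n < 10 then (PySem.Dict.ofList [("[0-10[", a), ("[10-12[", b), ("[12-14[", c), ("[14-16[", d), ("[16-20]", e)]).modify "[0-10[" 0 (· + 1) else if n < 12 then (PySem.Dict.ofList [("[0-10[", a), ("[10-12[", b), ("[12-14[", c), ("[14-16[", d), ("[16-20]", e)]).modify "[10-12[" 0 (· + 1) else if n < 14 then (PySem.Dict.ofList [("[0-10[", a), ("[10-12[", b), ("[12-14[", c), ("[14-16[", d), ("[16-20]", e)]).modify "[12-14[" 0 (· + 1) else if n < 16 then (PySem.Dict.ofList [("[0-10[", a), ("[10-12[", b), ("[12-14[", c), ("[14-16[", d), ("[16-20]", e)]).modify "[14-16[" 0 (· + 1) else (PySem.Dict.ofList [("[0-10[", a), ("[10-12[", b), ("[12-14[", c), ("[14-16[", d), ("[16-20]", e)]).modify "[16-20]" 0 (· + 1)) = PySem.Dict.ofList [("[0-10[", a), ("[10-12[", b), ("[12-14[", c), ("[14-16[", d), ("[16-20]",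 e + 1)] from by
        simp only [if_neg (by omega : ¬ (n < 10)), if_neg (by omega : ¬ (n < 12)), if_neg (by omega : ¬ (n < 14)), if_neg (by omega : ¬ (n < 16)), ]; simp [PySem.Dict.ofList, PySem.Dict.modify]; rfl]
      rw [ih]
      congr 1
      simp [List.getD, show (((10:Int)) ≤ n) by omega, show (((12:Int)) ≤ n) by omega, show (((14:Int)) ≤ n) by omega, show (((16:Int)) ≤ n) by omega]

-- ===== VERDICT (by name: the statement is the Claim_ definition above) =====
theorem repartition_py_spec : Claim_equal_repartition_py := by
  intro notes _
  unfold Spec_repartition_py repartition_py repartition_py_alt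
  exact repartition_inv notes 0 0 0 0 0
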